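-- pv_equiv track=rewrite | github.com/1mozolacal/Machine_Learning_Challenge | Calvin_Mozola_MachineLearning_DataVisulization.py | findColSetup
-- ===== SOURCE A (Python) =====
-- def findColSetup(columns, depth):
--     discoverNum = 0
--     thisLevelBuild = []
--     returnLists = []
--     for index,col in enumerate(columns):
--         if not col[depth].startswith("Unnamed:"):
--             if discoverNum == 1 and depth+1 < len(col):
--                 smallerLists = findColSetup( columns[:index], depth+1)
--                 returnLists.extend(smallerLists)
--             discoverNum+=1
--             thisLevelBuild.append(col[depth])
--     returnLists.insert( 0, thisLevelBuild)
--     return returnLists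
-- ===== SOURCE B (Python) =====
-- def findColSetup(columns, depth):
--     # Iterative version: explicit while loop with a growing result list instead of recursion.
--     result = []
--     cols = columns
--     d = depth
--     while True:
--         discover = 0
--         level = []
--         next_prefix = None
--         for index, col in enumerate(cols):
--             if not col[d].startswith("Unnamed:"):
--                 if discover == 1 and d + 1 < len(col):
--                     next_prefix = cols[:index]
--                 discover += 1
--                 level.append(col[d])
--         result.append(level)
--         if next_prefix is None:
--             return result
--         cols = next_prefix
--         d += 1
-- ===== Notes on version B (the rewrite author's own statement) =====
-- stated objective: alternative
-- what changed: Replaces A's recursion (a recursive call fired mid-scan at the second named column, spliced into the return list) by an explicit while loop that scans one header level at a time, appends each level to a growing result list and records the next prefix to descend into.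
import Mathlib
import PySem

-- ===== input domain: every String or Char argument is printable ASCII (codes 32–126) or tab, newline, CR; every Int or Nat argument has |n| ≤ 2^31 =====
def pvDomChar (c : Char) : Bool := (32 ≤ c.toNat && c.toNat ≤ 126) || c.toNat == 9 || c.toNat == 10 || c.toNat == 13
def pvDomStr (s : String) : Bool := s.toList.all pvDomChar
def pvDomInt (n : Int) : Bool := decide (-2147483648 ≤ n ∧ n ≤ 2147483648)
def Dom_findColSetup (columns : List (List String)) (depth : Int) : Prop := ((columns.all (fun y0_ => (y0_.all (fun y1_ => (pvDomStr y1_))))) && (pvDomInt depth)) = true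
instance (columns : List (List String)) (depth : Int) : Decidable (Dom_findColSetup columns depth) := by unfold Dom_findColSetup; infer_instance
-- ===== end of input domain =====

-- B replaces A's recursion by an explicit while loop that appends each level to a growing
-- result list, recording the next prefix during the scan (same cost; objective: alternative).

-- ===== PORT A =====
-- The for loop over enumerate(columns) is the inner recursion findColSetupLoop over the
-- remaining suffix `rest`; the processed prefix `done` IS columns[:index] (same value),
-- threaded so the recursive call `findColSetup(columns[:index], depth+1)` is literal.
-- col[depth] is PySem.List.pyGet?; on a none (Python IndexError, excluded by Pre_) the
-- port uses "" as the element.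
mutual
def findColSetup (columns : List (List String)) (depth : Int) : List (List String) :=
  findColSetupLoop depth [] columns 0 [] []
termination_by (columns.length, 1, 0)

def findColSetupLoop (depth : Int) (done rest : List (List String))
    (discoverNum : Int) (thisLevelBuild : List String)
    (returnLists : List (List String)) : List (List String) :=
  match rest with
  | [] => thisLevelBuild :: returnLists          -- returnLists.insert(0, thisLevelBuild)
  | col :: rs =>
    let s := (PySem.List.pyGet? col depth).getD ""
    if ¬ PySem.Str.startswith s "Unnamed:" then
      let returnLists' :=
        if discoverNum = 1 ∧ depth + 1 < (col.length : Int) then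
          returnLists ++ findColSetup done (depth + 1)     -- columns[:index] = done
        else returnLists
      findColSetupLoop depth (done ++ [col]) rs (discoverNum + 1)
        (thisLevelBuild ++ [s]) returnLists'
    else
      findColSetupLoop depth (done ++ [col]) rs discoverNum thisLevelBuild returnLists
termination_by (done.length + rest.length, 0, rest.length)
decreasing_by all_goals (simp [Prod.lex_def]; try omega)
end

-- ===== PORT B =====
-- One scan of the current level: returns (level, next_prefix).
def fcsScan (d : Int) (done rest : List (List String))
    (discover : Int) (level : List String)
    (nextPrefix : Option (List (List String))) :
    List String × Option (List (List String)) :=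
  match rest with
  | [] => (level, nextPrefix)
  | col :: rs =>
    let s := (PySem.List.pyGet? col d).getD ""
    if ¬ PySem.Str.startswith s "Unnamed:" then
      let nextPrefix' :=
        if discover = 1 ∧ d + 1 < (col.length : Int) then some done else nextPrefix
      fcsScan d (done ++ [col]) rs (discover + 1) (level ++ [s]) nextPrefix'
    else
      fcsScan d (done ++ [col]) rs discover level nextPrefix

-- Captured prefix is strictly shorter than the scanned list (used for termination of the while loop).
theorem fcsScan_prefix_lt (d : Int) (rest : List (List String)) :
    ∀ (done : List (List String)) (discover : Int) (level : List String)
      (np : Option (List (List String))) (p : List (List String)),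
      (∀ q, np = some q → q.length < done.length + rest.length) →
      (fcsScan d done rest discover level np).2 = some p →
      p.length < done.length + rest.length := by
  induction rest with
  | nil =>
    intro done discover level np p h hp
    simp only [fcsScan] at hp
    exact h p hp
  | cons col rs ih =>
    intro done discover level np p h hp
    simp only [fcsScan] at hp
    have key : ∀ (disc' : Int) (lv' : List String) (np' : Option (List (List String))),
        (∀ q, np' = some q → q.length < (done ++ [col]).length + rs.length) →
        (fcsScan d (done ++ [col]) rs disc' lv' np').2 = some p →
        p.length < done.length + (col :: rs).length := by
      intro disc' lv' np' hinv hp'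
      have := ih (done ++ [col]) disc' lv' np' p hinv hp'
      simp only [List.length_append, List.length_cons, List.length_nil] at this ⊢
      omega
    split at hp
    · refine key _ _ _ (fun q hq => ?_) hp
      split at hq
      · cases hq
        simp only [List.length_append, List.length_singleton]
        omega
      · have := h q hq
        simp only [List.length_append, List.length_cons, List.length_nil] at this ⊢
        omega
    · refine key _ _ _ (fun q hq => ?_) hp
      have := h q hq
      simp only [List.length_append, List.length_cons, List.length_nil] at this ⊢
      omega

-- The while loop: scan the current cols at depth d, append the level, descend into the
-- recorded prefix if one was recorded, else stop.
def fcsWhile (cols : List (List String)) (d : Int) (result : List (List String)) :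
    List (List String) :=
  let scanned := fcsScan d [] cols 0 [] none
  match hnp : scanned.2 with
  | none => result ++ [scanned.1]
  | some p => fcsWhile p (d + 1) (result ++ [scanned.1])
termination_by cols.length
decreasing_by
  exact by simpa using fcsScan_prefix_lt d cols [] 0 [] none p (by simp) hnp

def findColSetup_alt (columns : List (List String)) (depth : Int) : List (List String) :=
  fcsWhile columns depth []

-- ===== PRECONDITION & SPEC =====
-- Pre_ excludes EXACTLY the inputs on which the Python A raises IndexError (B raises
-- there too) and no input on which A returns: it lists the cells the scan reads — each
-- level's columns at its depth, descending into the prefix before the second named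
-- column when that column is long enough — and requires every read index in range.
-- fcsNextAux: the prefix the scan descends into at this level, if any (none otherwise).
def fcsNextAux (d : Int) (done rest : List (List String)) (disc : Int) :
    Option (List (List String)) :=
  match rest with
  | [] => none
  | col :: rs =>
    if ¬ PySem.Str.startswith ((PySem.List.pyGet? col d).getD "") "Unnamed:" then
      if disc = 1 ∧ d + 1 < (col.length : Int) then some done
      else fcsNextAux d (done ++ [col]) rs (disc + 1)
    else fcsNextAux d (done ++ [col]) rs disc

-- All reads at this level in range, then the descended-into prefix at the next depth.
-- `levels` is only a structural bound on the number of levels: each descent goes to a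
-- strict prefix, so columns.length + 1 levels always cover the whole descent chain.
def fcsSafeLevels (levels : Nat) (cols : List (List String)) (d : Int) : Bool :=
  match levels with
  | 0 => true
  | levels + 1 =>
    cols.all (fun c => decide (PySem.Raise.InRange c.length d)) &&
      match fcsNextAux d [] cols 0 with
      | none => true
      | some p => fcsSafeLevels levels p (d + 1)

def Pre_findColSetup (columns : List (List String)) (depth : Int) : Prop :=
  fcsSafeLevels (columns.length + 1) columns depth = true
instance (columns : List (List String)) (depth : Int) : Decidable (Pre_findColSetup columns depth) := by unfold Pre_findColSetup; infer_instance

def pvWitness_findColSetup : List (List String) × Int :=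
  ([["a", "b"], ["Unnamed: 0", "c"], ["d", "e"]], 0)

def Spec_findColSetup (columns : List (List String)) (depth : Int) (out : List (List String)) : Prop := out = findColSetup_alt columns depth
instance (columns : List (List String)) (depth : Int) (out : List (List String)) : Decidable (Spec_findColSetup columns depth out) := by unfold Spec_findColSetup; infer_instance

-- ===== CLAIM (what is proved, stated in full; the proofs are below) =====
def Claim_equal_findColSetup : Prop := ∀ (columns : List (List String)) (depth : Int), Dom_findColSetup columns depth → Pre_findColSetup columns depth → Spec_findColSetup columns depth (findColSetup columns depth)

-- ===== LEMMAS AND PROOFS =====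

-- B's pending prefix, as the list A has already appended for it.
def fcsPending (d : Int) : Option (List (List String)) → List (List String)
  | none => []
  | some p => findColSetup p (d + 1)

-- A's loop equals B's scan, with A's appended recursion result tracked through fcsPending.
theorem loop_eq_scan (d : Int) (rest : List (List String)) :
    ∀ (done : List (List String)) (disc : Int) (build : List String)
      (r : List (List String)) (np : Option (List (List String))),
      (np.isSome → 2 ≤ disc) →
      findColSetupLoop d done rest disc build (r ++ fcsPending d np) =
        (fcsScan d done rest disc build np).1 ::
          (r ++ fcsPending d (fcsScan d done rest disc build np).2) := by
  induction rest with
  | nil => intro done disc build r np h; simp [findColSetupLoop, fcsScan]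
  | cons col rs ih =>
    intro done disc build r np h
    simp only [findColSetupLoop, fcsScan]
    split
    · by_cases hc : disc = 1 ∧ d + 1 < (col.length : Int)
      · have hnp : np = none := by
          cases np with
          | none => rfl
          | some q => exact absurd (h (by simp)) (by omega)
        subst hnp
        simp only [if_pos hc, fcsPending, List.append_nil]
        have := ih (done ++ [col]) (disc + 1) (build ++ [(PySem.List.pyGet? col d).getD ""])
          r (some done) (by intro _; omega)
        simpa [fcsPending] using this
      · simp only [if_neg hc]
        exact ih (done ++ [col]) (disc + 1) _ r np (by intro hs; have := h hs; omega)
    · exact ih (done ++ [col]) disc build r np h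

-- Accumulator lemma for the while loop.
theorem fcsWhile_acc (n : Nat) :
    ∀ (cols : List (List String)), cols.length ≤ n → ∀ (d : Int) (res : List (List String)),
      fcsWhile cols d res = res ++ fcsWhile cols d [] := by
  induction n with
  | zero =>
    intro cols hlen d res
    rw [fcsWhile, fcsWhile]
    split
    · simp
    · rename_i p hp
      exact absurd (by simpa using fcsScan_prefix_lt d cols [] 0 [] none p (by simp) hp)
        (by omega)
  | succ m ih =>
    intro cols hlen d res
    rw [fcsWhile, fcsWhile]
    split
    · simp
    · rename_i p hp
      have hplt : p.length < cols.length := by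
        simpa using fcsScan_prefix_lt d cols [] 0 [] none p (by simp) hp
      rw [ih p (by omega) (d + 1) (res ++ _), ih p (by omega) (d + 1) ([] ++ _)]
      simp

-- Main equivalence, by strong induction on the list length.
theorem findColSetup_eq_alt (n : Nat) :
    ∀ (cols : List (List String)), cols.length ≤ n → ∀ (d : Int),
      findColSetup cols d = findColSetup_alt cols d := by
  induction n with
  | zero =>
    intro cols hlen d
    have : cols = [] := List.length_eq_zero_iff.mp (by omega)
    subst this
    rw [findColSetup, findColSetup_alt, fcsWhile]
    simp [findColSetupLoop, fcsScan]
  | succ m ih =>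
    intro cols hlen d
    rw [findColSetup, findColSetup_alt, fcsWhile]
    have hmain := loop_eq_scan d cols [] 0 [] [] none (by simp)
    simp only [fcsPending, List.append_nil, List.nil_append] at hmain
    split
    · rename_i hp
      rw [hmain, hp]
      simp
    · rename_i p hp
      have hplt : p.length < cols.length := by
        simpa using fcsScan_prefix_lt d cols [] 0 [] none p (by simp) hp
      rw [hmain, hp]
      rw [fcsWhile_acc m p (by omega) (d + 1)]
      have hih := ih p (by omega) (d + 1)
      rw [findColSetup_alt] at hih
      simp [hih]

-- ===== VERDICT (by name: the statement is the Claim_ definition above) =====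
theorem findColSetup_spec : Claim_equal_findColSetup := by
  intro columns depth _ _
  unfold Spec_findColSetup
  exact findColSetup_eq_alt columns.length columns le_rfl depth
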